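-- pv_equiv track=rewrite | github.com/Lijl-quality-tools/SMT-Station-Check-tool | src/utils.py | deduplicate_headers
-- ===== SOURCE A (Python) =====
-- def deduplicate_headers(headers):
--     """
--     处理列表中的重复字符串，为重复项添加序号后缀
--
--     Args:
--         headers: 字符串列表（如表头）
--
--     Returns:
--         List[str]: 处理后的新列表，重复项被添加 .1, .2 等后缀
--
--     Example:
--         ['A', 'B', 'A', 'C'] -> ['A', 'B', 'A.1', 'C']
--     """
--     seen = {}
--     result = []
--
--     for header in headers:
--         if header not in seen:
--             seen[header] = 0
--             result.append(header)
--         else: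
--             seen[header] += 1
--             result.append(f"{header}.{seen[header]}")
--
--     return result
-- ===== SOURCE B (Python) =====
-- def deduplicate_headers(headers):
--     """Closed-form per position: label each header by its count in the prefix before it."""
--     def label(i, h):
--         k = headers[:i].count(h)
--         return h if k == 0 else f"{h}.{k}"
--     return [label(i, h) for i, h in enumerate(headers)]
-- ===== Notes on version B (the rewrite author's own statement) =====
-- stated objective: simpler
-- what changed: Replaces the stateful one-pass loop carrying a seen-counter dict with a stateless per-position closed form: each output is determined directly from the count of the header in the prefix before it, built as a comprehension.
import Mathlib
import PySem

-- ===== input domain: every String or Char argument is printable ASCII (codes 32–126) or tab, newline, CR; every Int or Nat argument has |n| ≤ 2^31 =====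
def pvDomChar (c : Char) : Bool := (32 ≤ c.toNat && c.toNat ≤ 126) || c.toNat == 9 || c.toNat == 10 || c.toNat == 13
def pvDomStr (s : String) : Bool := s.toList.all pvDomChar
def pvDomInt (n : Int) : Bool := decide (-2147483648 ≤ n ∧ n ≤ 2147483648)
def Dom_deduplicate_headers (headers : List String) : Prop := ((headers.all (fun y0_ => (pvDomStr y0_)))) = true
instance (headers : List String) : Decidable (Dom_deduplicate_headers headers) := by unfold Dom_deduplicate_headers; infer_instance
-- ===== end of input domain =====

-- B replaces A's stateful seen-dict sweep with a stateless per-position closed form (prefix counts); objective: simpler.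

-- ===== PORT A =====
-- the body of A's for-loop: state = (seen : dict header -> counter, result list)
def pvStepA (st : PySem.Dict String Int × List String) (header : String) :
    PySem.Dict String Int × List String :=
  if st.1.contains header = false then
    (st.1.insert header 0, st.2 ++ [header])
  else
    let v := st.1.getD header 0 + 1
    (st.1.insert header v, st.2 ++ [header ++ "." ++ PySem.Int.toStr v])

def deduplicate_headers (headers : List String) : List String :=
  (headers.foldl pvStepA (PySem.Dict.empty, [])).2

-- ===== PORT B =====
-- headers[:i].count(h) as slice+count; label per enumerated position
def deduplicate_headers_alt (headers : List String) : List String :=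
  (PySem.List.enumerate headers 0).map (fun p =>
    let k : Int := ((PySem.List.slice headers none (some p.1)).count p.2 : Nat)
    if k = 0 then p.2 else p.2 ++ "." ++ PySem.Int.toStr k)

-- ===== PRECONDITION & SPEC =====
def Spec_deduplicate_headers (headers : List String) (out : List String) : Prop := out = deduplicate_headers_alt headers
instance (headers : List String) (out : List String) : Decidable (Spec_deduplicate_headers headers out) := by unfold Spec_deduplicate_headers; infer_instance

-- ===== CLAIM (what is proved, stated in full; the proofs are below) =====
def Claim_equal_deduplicate_headers : Prop := ∀ (headers : List String), Dom_deduplicate_headers headers → Spec_deduplicate_headers headers (deduplicate_headers headers)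

-- ===== LEMMAS AND PROOFS =====

lemma enumerate_append_singleton {α : Type} (xs : List α) (y : α) (s : Int) :
    PySem.List.enumerate (xs ++ [y]) s = PySem.List.enumerate xs s ++ [(s + xs.length, y)] := by
  induction xs generalizing s with
  | nil => simp [PySem.List.enumerate_nil, PySem.List.enumerate_cons]
  | cons x xs ih =>
      simp only [List.cons_append, PySem.List.enumerate_cons, ih, List.length_cons]
      push_cast
      ring_nf

lemma mem_enumerate_bounds {α : Type} {xs : List α} {s : Int} {p : Int × α}
    (h : p ∈ PySem.List.enumerate xs s) : s ≤ p.1 ∧ p.1 < s + xs.length := by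
  induction xs generalizing s with
  | nil => simp [PySem.List.enumerate_nil] at h
  | cons x xs ih =>
      rw [PySem.List.enumerate_cons] at h
      rcases List.mem_cons.mp h with h | h
      · subst h; simp
      · have := ih h
        simp only [List.length_cons]
        push_cast
        omega

-- the label B attaches at a position whose preceding prefix contains h exactly c times
def pvLabel (h : String) (c : Nat) : String :=
  if c = 0 then h else h ++ "." ++ PySem.Int.toStr (c : Int)

lemma alt_snoc (hs : List String) (h : String) :
    deduplicate_headers_alt (hs ++ [h]) = deduplicate_headers_alt hs ++ [pvLabel h (hs.count h)] := by
  unfold deduplicate_headers_alt pvLabel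
  rw [enumerate_append_singleton, List.map_append]
  congr 1
  · apply List.map_congr_left
    intro p hp
    have hb := mem_enumerate_bounds hp
    have h0 : (0:Int) ≤ p.1 := hb.1
    have hle : p.1.toNat ≤ hs.length := by omega
    simp only [PySem.List.slice_to _ h0, List.take_append_of_le_length hle]
  · have h0 : (0:Int) ≤ (hs.length : Int) := by positivity
    simp only [List.map_cons, List.map_nil]
    rw [show ((0:Int) + hs.length) = (hs.length : Int) by ring,
      PySem.List.slice_to _ h0, Int.toNat_natCast, List.take_left' rfl]
    simp

lemma fold_invariant (hs : List String) :
    (hs.foldl pvStepA (PySem.Dict.empty, [])).2 = deduplicate_headers_alt hs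
    ∧ ∀ h : String,
        (hs.foldl pvStepA (PySem.Dict.empty, [])).1.contains h = decide (h ∈ hs)
        ∧ (h ∈ hs → (hs.foldl pvStepA (PySem.Dict.empty, [])).1.getD h 0 = (hs.count h : Int) - 1) := by
  induction hs using List.reverseRecOn with
  | nil =>
      refine ⟨by simp [deduplicate_headers_alt, PySem.List.enumerate_nil], ?_⟩
      intro h
      simp [PySem.Dict.contains_empty]
  | append_singleton hs h ih =>
      obtain ⟨ihres, ihd⟩ := ih
      rw [List.foldl_append, List.foldl_cons, List.foldl_nil]
      set st := List.foldl pvStepA (PySem.Dict.empty, []) hs with hst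
      rw [alt_snoc]
      by_cases hmem : h ∈ hs
      · -- duplicate: the seen-branch fires
        have hcontains : st.1.contains h = true := by rw [(ihd h).1]; simp [hmem]
        have hv : st.1.getD h 0 = (hs.count h : Int) - 1 := (ihd h).2 hmem
        have hcount : 0 < hs.count h := List.count_pos_iff.mpr hmem
        have hstep : pvStepA st h =
            (st.1.insert h (st.1.getD h 0 + 1),
             st.2 ++ [h ++ "." ++ PySem.Int.toStr (st.1.getD h 0 + 1)]) := by
          simp [pvStepA, hcontains]
        rw [hstep]
        refine ⟨?_, ?_⟩
        · have hne : hs.count h ≠ 0 := by omega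
          simp only [ihres, hv, pvLabel]
          rw [show (hs.count h : Int) - 1 + 1 = (hs.count h : Int) by omega]
          simp [hne]
        · intro h'
          by_cases he : h' = h
          · constructor
            · rw [he, PySem.Dict.contains_insert_self]
              simp
            · intro _
              rw [he]
              have hca : (hs ++ [h]).count h = hs.count h + 1 := by simp
              rw [PySem.Dict.getD_insert, if_pos rfl, hv, hca]
              push_cast
              omega
          · constructor
            · rw [PySem.Dict.contains_insert, (ihd h').1]
              simp [List.mem_append, he]
            · intro hm
              have hm' : h' ∈ hs := by
                rcases List.mem_append.mp hm with hx | hx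
                · exact hx
                · simp at hx; exact absurd hx he
              rw [PySem.Dict.getD_insert, if_neg he, (ihd h').2 hm']
              have : (hs ++ [h]).count h' = hs.count h' := by
                simp [List.count_append, Ne.symm he]
              rw [this]
      · -- first occurrence: the not-seen branch fires
        have hcontains : st.1.contains h = false := by rw [(ihd h).1]; simp [hmem]
        have hcount : hs.count h = 0 := List.count_eq_zero.mpr hmem
        have hstep : pvStepA st h = (st.1.insert h 0, st.2 ++ [h]) := by
          simp [pvStepA, hcontains]
        rw [hstep]
        refine ⟨?_, ?_⟩
        · simp [ihres, pvLabel, hcount]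
        · intro h'
          by_cases he : h' = h
          · constructor
            · rw [he, PySem.Dict.contains_insert_self]
              simp
            · intro _
              rw [he]
              have hca : (hs ++ [h]).count h = hs.count h + 1 := by simp
              rw [PySem.Dict.getD_insert, if_pos rfl, hca, hcount]
              simp
          · constructor
            · rw [PySem.Dict.contains_insert, (ihd h').1]
              simp [List.mem_append, he]
            · intro hm
              have hm' : h' ∈ hs := by
                rcases List.mem_append.mp hm with hx | hx
                · exact hx
                · simp at hx; exact absurd hx he
              rw [PySem.Dict.getD_insert, if_neg he, (ihd h').2 hm']
              have : (hs ++ [h]).count h' = hs.count h' := by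
                simp [List.count_append, Ne.symm he]
              rw [this]

-- ===== VERDICT (by name: the statement is the Claim_ definition above) =====
theorem deduplicate_headers_spec : Claim_equal_deduplicate_headers := by
  intro headers _
  unfold Spec_deduplicate_headers deduplicate_headers
  exact (fold_invariant headers).1
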